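-- pv_equiv track=rewrite | github.com/PranuvR/APO-Scheduler | optimizer.py | compute_all_overlaps
-- ===== SOURCE A (Python) =====
-- def compute_all_overlaps(course_student_ids):
--     """
--     Returns a list of (course1, course2, overlap_count) sorted by overlap_count descending.
--     """
--     course_names = list(course_student_ids.keys())
--     overlaps = []
--     for i in range(len(course_names)):
--         c1 = course_names[i]
--         s1 = set(course_student_ids[c1])
--         for j in range(i + 1, len(course_names)):
--             c2 = course_names[j]
--             s2 = set(course_student_ids[c2])
--             inter = len(s1 & s2)
--             if inter > 0:
--                 overlaps.append((c1, c2, inter))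
--
--     overlaps.sort(key=lambda x: x[2], reverse=True)
--     return overlaps
-- ===== SOURCE B (Python) =====
-- def compute_all_overlaps(course_student_ids):
--     """
--     Returns a list of (course1, course2, overlap_count) sorted by overlap_count descending.
--     """
--     # inverted index: student -> list of courses containing it (courses in dict order)
--     index = {}
--     for course, ids in course_student_ids.items():
--         for sid in set(ids):
--             index.setdefault(sid, []).append(course)
--     # count each co-enrolled (distinct) student once per course pair
--     counter = {}
--     for courses in index.values():
--         rest = courses
--         while rest:
--             c1, rest = rest[0], rest[1:]
--             for c2 in rest:
--                 pair = (c1, c2)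
--                 counter[pair] = counter.get(pair, 0) + 1
--     # re-emit in course order (same tie-break as pairwise enumeration), then stable sort by count desc
--     overlaps = []
--     rest = list(course_student_ids)
--     while rest:
--         c1, rest = rest[0], rest[1:]
--         for c2 in rest:
--             if (c1, c2) in counter:
--                 overlaps.append((c1, c2, counter[(c1, c2)]))
--     overlaps.sort(key=lambda x: x[2], reverse=True)
--     return overlaps
-- ===== Notes on version B (the rewrite author's own statement) =====
-- stated objective: faster
-- what changed: Replaces the all-pairs set-intersection scan (building both student sets and intersecting them for every course pair) with an inverted student->courses index whose per-student course lists are pair-counted into a counter dict, re-emitted in course order to keep A's tie-break, so no set intersection is ever computed.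
import Mathlib
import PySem

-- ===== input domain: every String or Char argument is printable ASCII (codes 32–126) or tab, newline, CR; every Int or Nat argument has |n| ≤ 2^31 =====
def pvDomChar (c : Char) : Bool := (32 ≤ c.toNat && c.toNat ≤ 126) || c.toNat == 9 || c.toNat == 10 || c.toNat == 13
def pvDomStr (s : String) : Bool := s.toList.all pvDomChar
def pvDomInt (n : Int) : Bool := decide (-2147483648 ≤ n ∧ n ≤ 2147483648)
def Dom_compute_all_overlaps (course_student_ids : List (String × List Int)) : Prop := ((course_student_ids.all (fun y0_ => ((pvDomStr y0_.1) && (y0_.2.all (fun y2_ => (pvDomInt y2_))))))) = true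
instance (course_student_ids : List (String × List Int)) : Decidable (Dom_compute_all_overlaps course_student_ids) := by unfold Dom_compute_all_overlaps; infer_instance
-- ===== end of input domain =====

-- B replaces A's all-pairs set-intersection scan by an inverted student->courses index whose
-- per-student course lists are pair-counted into a counter dict (re-emitted in course order
-- to keep A's tie-break): objective = faster (no set intersection per course pair).

-- ===== PORT A =====
def compute_all_overlaps (course_student_ids : List (String × List Int)) : List (String × String × Int) :=
  let d := PySem.Dict.ofList course_student_ids
  let course_names := d.keys
  let overlaps := (PySem.List.pyRange 0 (course_names.length : Int)).foldl (fun acc i =>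
    let c1 := PySem.List.pyGetD course_names i ""
    let s1 := PySem.Set.ofList (d.getD c1 [])
    (PySem.List.pyRange (i + 1) (course_names.length : Int)).foldl (fun acc j =>
      let c2 := PySem.List.pyGetD course_names j ""
      let s2 := PySem.Set.ofList (d.getD c2 [])
      let inter := PySem.Set.len (PySem.Set.inter s1 s2)
      if inter > 0 then acc ++ [(c1, c2, inter)] else acc) acc) ([] : List (String × String × Int))
  PySem.List.sorted overlaps (fun x => x.2.2) true

-- ===== PORT B =====
-- port of Source B's 'while rest: c1, rest = rest[0], rest[1:]; for c2 in rest: counter[pair] = counter.get(pair, 0) + 1'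
def pvPairCount : PySem.Dict (String × String) Int → List String → PySem.Dict (String × String) Int
  | ct, [] => ct
  | ct, c1 :: rest =>
    pvPairCount (rest.foldl (fun ct c2 => ct.insert (c1, c2) (ct.getD (c1, c2) 0 + 1)) ct) rest

-- port of Source B's emission loop 'while rest: …; for c2 in rest: if (c1, c2) in counter: overlaps.append(…)'
def pvEmit (ct : PySem.Dict (String × String) Int) :
    List String → List (String × String × Int) → List (String × String × Int)
  | [], acc => acc
  | c1 :: rest, acc =>
    pvEmit ct rest
      (rest.foldl (fun a c2 =>
        if ct.contains (c1, c2) then a ++ [(c1, c2, ct.getD (c1, c2) 0)] else a) acc)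

def compute_all_overlaps_alt (course_student_ids : List (String × List Int)) : List (String × String × Int) :=
  let d := PySem.Dict.ofList course_student_ids
  -- inverted index: student -> list of courses containing it (courses in dict order)
  let index := d.items.foldl (fun ix p =>
      (PySem.Set.ofList p.2).foldl (fun ix sid => ix.modify sid [] (· ++ [p.1])) ix)
    (PySem.Dict.empty : PySem.Dict Int (List String))
  -- count each co-enrolled (distinct) student once per course pair
  let counter := index.values.foldl (fun ct cl => pvPairCount ct cl) PySem.Dict.empty
  -- re-emit in course order (same tie-break as A), then stable sort by count desc
  let overlaps := pvEmit counter d.keys []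
  PySem.List.sorted overlaps (fun x => x.2.2) true

-- ===== PRECONDITION & SPEC =====
def Spec_compute_all_overlaps (course_student_ids : List (String × List Int)) (out : List (String × String × Int)) : Prop := out = compute_all_overlaps_alt course_student_ids
instance (course_student_ids : List (String × List Int)) (out : List (String × String × Int)) : Decidable (Spec_compute_all_overlaps course_student_ids out) := by unfold Spec_compute_all_overlaps; infer_instance

-- ===== CLAIM (what is proved, stated in full; the proofs are below) =====
def Claim_equal_compute_all_overlaps : Prop := ∀ (course_student_ids : List (String × List Int)), Dom_compute_all_overlaps course_student_ids → Spec_compute_all_overlaps course_student_ids (compute_all_overlaps course_student_ids)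

-- ===== LEMMAS AND PROOFS =====

-- generic structural fold over the ordered pairs of a list
def pvPairsFold {β : Type} (step : β → String → String → β) : β → List String → β
  | acc, [] => acc
  | acc, c1 :: rest => pvPairsFold step (rest.foldl (fun a c2 => step a c1 c2) acc) rest

-- the ordered pairs of a list, as a list
def pvPairsList : List String → List (String × String)
  | [] => []
  | c :: t => t.map (fun c2 => (c, c2)) ++ pvPairsList t

-- the flattened (student, course) pair list of the inverted-index loop
def pvFlat (items : List (String × List Int)) : List (Int × String) :=
  items.flatMap (fun p => (PySem.Set.ofList p.2).map (fun sid => (sid, p.1)))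

theorem pvPairsList_mem {cl : List String} {a b : String}
    (h : (a, b) ∈ pvPairsList cl) : a ∈ cl ∧ b ∈ cl := by
  induction cl with
  | nil => simp [pvPairsList] at h
  | cons c t ih =>
    simp only [pvPairsList, List.mem_append, List.mem_map] at h
    rcases h with ⟨x, hx, he⟩ | h
    · injection he with h1 h2
      subst h1; subst h2
      exact ⟨List.mem_cons_self, List.mem_cons_of_mem _ hx⟩
    · rcases ih h with ⟨ha, hb⟩
      exact ⟨List.mem_cons_of_mem _ ha, List.mem_cons_of_mem _ hb⟩

theorem pvPairsFold_congr {β : Type} (f g : β → String → String → β) (R : String → String → Prop) :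
    ∀ (cl : List String), cl.Pairwise R →
    (∀ a c1 c2, c1 ∈ cl → c2 ∈ cl → R c1 c2 → f a c1 c2 = g a c1 c2) →
    ∀ acc, pvPairsFold f acc cl = pvPairsFold g acc cl := by
  intro cl
  induction cl with
  | nil => intro _ _ _; rfl
  | cons c t ih =>
    intro hp hfg acc
    simp only [pvPairsFold]
    have hR := (List.pairwise_cons.mp hp).1
    rw [PySem.List.foldl_congr_mem t (fun a c2 => f a c c2) (fun a c2 => g a c c2) acc
      (fun a x hx => hfg a c x List.mem_cons_self (List.mem_cons_of_mem _ hx) (hR x hx))]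
    exact ih (List.pairwise_cons.mp hp).2
      (fun a c1 c2 h1 h2 hr => hfg a c1 c2 (List.mem_cons_of_mem _ h1) (List.mem_cons_of_mem _ h2) hr) _

theorem pvPairsList_count (R : String → String → Prop)
    (hasym : ∀ a b, R a b → ¬ R b a) :
    ∀ (cl : List String), cl.Nodup → cl.Pairwise R →
      ∀ c1 c2, R c1 c2 →
        (pvPairsList cl).count (c1, c2) = if c1 ∈ cl ∧ c2 ∈ cl then 1 else 0 := by
  intro cl
  induction cl with
  | nil => intro _ _ c1 c2 _; simp [pvPairsList]
  | cons c t ih =>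
    intro hnd hp c1 c2 hR
    have hne : c1 ≠ c2 := by rintro rfl; exact hasym _ _ hR hR
    have hndt : t.Nodup := (List.nodup_cons.mp hnd).2
    have hcnotint : c ∉ t := (List.nodup_cons.mp hnd).1
    have hpt : t.Pairwise R := (List.pairwise_cons.mp hp).2
    have hRc := (List.pairwise_cons.mp hp).1
    simp only [pvPairsList, List.count_append]
    by_cases hc : c = c1
    · subst hc
      have hmap : (t.map (fun c2 => (c, c2))).count (c, c2) = t.count c2 :=
        List.count_map_of_injective t _ (fun x y h => by injection h) c2
      have hrest : (pvPairsList t).count (c, c2) = 0 := by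
        rw [List.count_eq_zero]
        intro hmem
        exact hcnotint (pvPairsList_mem hmem).1
      rw [hmap, hrest]
      by_cases hc2 : c2 ∈ t
      · simp [List.count_eq_one_of_mem hndt hc2, hc2, hne.symm]
      · have : c2 ∉ (c :: t) := by
          intro h; rcases List.mem_cons.mp h with rfl | h
          · exact hne rfl
          · exact hc2 h
        simp [List.count_eq_zero.mpr hc2, this]
    · have hmap : (t.map (fun c2 => (c, c2))).count (c1, c2) = 0 := by
        rw [List.count_eq_zero]
        intro hmem
        rcases List.mem_map.mp hmem with ⟨x, _, he⟩
        injection he with h1 _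
        exact hc h1
      rw [hmap]
      by_cases hc2 : c2 = c
      · subst hc2
        have hc1nt : c1 ∉ t := by
          intro h1
          exact hasym _ _ hR (hRc c1 h1)
        have : (pvPairsList t).count (c1, c2) = 0 := by
          rw [List.count_eq_zero]; intro hmem
          exact hc1nt (pvPairsList_mem hmem).1
        have hc1nc : c1 ∉ (c2 :: t) := by
          intro h; rcases List.mem_cons.mp h with h | h
          · exact hc h.symm
          · exact hc1nt h
        simp only [this]
        simp [hc1nc]
      · rw [ih hndt hpt c1 c2 hR]
        have e1 : (c1 ∈ c :: t) ↔ (c1 ∈ t) :=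
          ⟨fun h => (List.mem_cons.mp h).resolve_left (fun e => hc e.symm), List.mem_cons_of_mem _⟩
        have e2 : (c2 ∈ c :: t) ↔ (c2 ∈ t) :=
          ⟨fun h => (List.mem_cons.mp h).resolve_left hc2, List.mem_cons_of_mem _⟩
        rw [if_congr (and_congr e1 e2) rfl rfl]
        simp

theorem pvPairCount_eq_foldl (ct : PySem.Dict (String × String) Int) (cl : List String) :
    pvPairCount ct cl = (pvPairsList cl).foldl (fun d x => d.insert x (d.getD x 0 + 1)) ct := by
  induction cl generalizing ct with
  | nil => rfl
  | cons c t ih =>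
    simp [pvPairCount, pvPairsList, ih, List.foldl_append, List.foldl_map]

theorem pvEmit_eq_pairsFold (ct : PySem.Dict (String × String) Int) :
    ∀ (cl : List String) (acc : List (String × String × Int)),
      pvEmit ct cl acc =
        pvPairsFold (fun a c1 c2 =>
          if ct.contains (c1, c2) then a ++ [(c1, c2, ct.getD (c1, c2) 0)] else a) acc cl := by
  intro cl
  induction cl with
  | nil => intro acc; rfl
  | cons c t ih => intro acc; simp [pvEmit, pvPairsFold, ih]

-- Nat-indexed version
theorem pvNatLoop {β : Type} (step : β → String → String → β) :
    ∀ (names : List String) (acc : β),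
      (List.range names.length).foldl (fun a k =>
        (names.drop (k+1)).foldl (fun a c2 => step a (names.getD k "") c2) a) acc
      = pvPairsFold step acc names := by
  intro names
  induction names with
  | nil => intro acc; rfl
  | cons c t ih =>
    intro acc
    simp only [List.length_cons]
    rw [List.range_succ_eq_map]
    simp only [List.foldl_cons, List.foldl_map]
    simp only [List.drop_succ_cons, List.getD_cons_succ, List.getD_cons_zero]
    rw [pvPairsFold]
    exact ih _

theorem pvDoubleLoop_eq_pairsFold {β : Type} (step : β → String → String → β)
    (names : List String) (acc : β) :
      (PySem.List.pyRange 0 (names.length : Int)).foldl (fun a i =>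
        (PySem.List.pyRange (i + 1) (names.length : Int)).foldl
          (fun a j => step a (PySem.List.pyGetD names i "") (PySem.List.pyGetD names j "")) a) acc
      = pvPairsFold step acc names := by
  rw [PySem.List.foldl_congr_mem _ _
    (fun a i => (names.drop (i+1).toNat).foldl
      (fun a c2 => step a (PySem.List.pyGetD names i "") c2) a) acc
    (fun a i hi => by
      have h0 : (0:Int) ≤ i + 1 := by
        have := (PySem.List.mem_pyRange_one.mp hi).1; omega
      exact PySem.List.foldl_pyRange_pyGetD' names ""
        (fun a c2 => step a (PySem.List.pyGetD names i "") c2) a h0)]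
  rw [PySem.List.pyRange_one]
  simp only [Int.sub_zero, Int.toNat_natCast, List.foldl_map, Int.zero_add]
  have hcast : ∀ (k : Nat) (a : β),
      (names.drop ((k:Int)+1).toNat).foldl
        (fun a c2 => step a (PySem.List.pyGetD names (k:Int) "") c2) a
      = (names.drop (k+1)).foldl (fun a c2 => step a (names.getD k "") c2) a := by
    intro k a
    have h1 : ((k:Int)+1).toNat = k + 1 := by omega
    rw [h1, PySem.List.pyGetD_natCast]
  rw [PySem.List.foldl_congr_mem _ _
    (fun a k => (names.drop (k+1)).foldl (fun a c2 => step a (names.getD k "") c2) a) acc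
    (fun a k _ => hcast k a)]
  exact pvNatLoop step names acc

-- I1: the nested index-building loop is the flat fold
theorem pvIndex_eq_flat_foldl (items : List (String × List Int)) :
    items.foldl (fun ix p =>
      (PySem.Set.ofList p.2).foldl (fun ix sid => ix.modify sid [] (· ++ [p.1])) ix)
      (PySem.Dict.empty : PySem.Dict Int (List String))
    = (pvFlat items).foldl (fun ix q => ix.modify q.1 [] (· ++ [q.2])) PySem.Dict.empty := by
  rw [pvFlat, List.foldl_flatMap]
  simp only [List.foldl_map]

-- nodup filter of a beq
theorem pvNodup_filter_beq (sid : Int) (S : List Int) (h : S.Nodup) :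
    S.filter (fun x => x == sid) = if sid ∈ S then [sid] else [] := by
  induction S with
  | nil => simp
  | cons x xs ih =>
    rcases List.nodup_cons.mp h with ⟨hx, hxs⟩
    by_cases he : x = sid
    · subst he
      have : xs.filter (fun y => y == x) = [] := by
        rw [List.filter_eq_nil_iff]; intro a ha hb
        exact hx (by simpa using (by exact (beq_iff_eq.mp hb) ▸ ha))
      simp [this]
    · simp only [List.filter_cons, beq_iff_eq, he, if_false, ih hxs, List.mem_cons]
      have heq : (sid = x ∨ sid ∈ xs) ↔ sid ∈ xs :=
        ⟨fun h' => h'.resolve_left (fun e => he e.symm), Or.inr⟩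
      rw [if_congr heq rfl rfl]

theorem pvFlat_filter (items : List (String × List Int)) (sid : Int) :
    ((pvFlat items).filter (fun q => q.1 == sid)).map (·.2)
    = (items.filter (fun p => p.2.contains sid)).map (·.1) := by
  induction items with
  | nil => rfl
  | cons p rest ih =>
    simp only [pvFlat, List.flatMap_cons, List.filter_append, List.map_append]
    rw [List.filter_map]
    have hcomp : ((fun q => q.1 == sid) ∘ (fun s => (s, p.1))) = (fun s => s == sid) := rfl
    rw [hcomp, pvNodup_filter_beq sid _ (PySem.Set.nodup_ofList p.2)]
    have hmem : (sid ∈ PySem.Set.ofList p.2) ↔ sid ∈ p.2 := PySem.Set.mem_ofList p.2 sid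
    rw [List.filter_cons]
    by_cases hc : sid ∈ p.2
    · have : p.2.contains sid = true := by simpa using hc
      simp only [this, if_pos, hmem.mpr hc, if_pos]
      simp only [List.map_cons, List.map_map]
      rw [← ih]; rfl
    · have : p.2.contains sid = false := by simpa using hc
      simp only [this]
      rw [if_neg (by simpa [hmem] using hc)]
      simpa using ih

theorem pvIndex_getD (items : List (String × List Int)) (sid : Int) :
    ((pvFlat items).foldl (fun ix q => ix.modify q.1 [] (· ++ [q.2]))
        (PySem.Dict.empty : PySem.Dict Int (List String))).getD sid []
    = (items.filter (fun p => p.2.contains sid)).map (·.1) := by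
  rw [PySem.Dict.getD_foldl_modify_append, PySem.Dict.getD_empty, List.nil_append,
    pvFlat_filter]

theorem pvIndex_keys (items : List (String × List Int)) :
    ((pvFlat items).foldl (fun ix q => ix.modify q.1 [] (· ++ [q.2]))
        (PySem.Dict.empty : PySem.Dict Int (List String))).keys
    = PySem.Set.ofList ((pvFlat items).map (·.1)) := by
  rw [PySem.Dict.keys_foldl_modify_key (pvFlat items) (·.1) [] (fun _ q v => v ++ [q.2]),
    PySem.Dict.keys_empty, PySem.Set.update_nil_left]

theorem pvIndex_keys_nodup (items : List (String × List Int)) :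
    ((pvFlat items).foldl (fun ix q => ix.modify q.1 [] (· ++ [q.2]))
        (PySem.Dict.empty : PySem.Dict Int (List String))).keys.Nodup := by
  apply PySem.Dict.nodup_keys_foldl_modify_key (pvFlat items) (·.1) [] (fun _ q v => v ++ [q.2])
  simp [PySem.Dict.keys_empty]

theorem pvMem_flat_fst (items : List (String × List Int)) (sid : Int) :
    sid ∈ (pvFlat items).map (·.1) ↔ ∃ p ∈ items, sid ∈ p.2 := by
  simp only [pvFlat, List.map_flatMap, List.mem_flatMap, List.map_map, List.mem_map]
  constructor
  · rintro ⟨p, hp, x, hx, rfl⟩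
    refine ⟨p, hp, ?_⟩
    have : (fun s => ((s, p.1) : Int × String).1) x = x := rfl
    rw [this] at *
    exact (PySem.Set.mem_ofList p.2 x).mp hx
  · rintro ⟨p, hp, hs⟩
    exact ⟨p, hp, sid, (PySem.Set.mem_ofList p.2 sid).mpr hs, rfl⟩

-- nodup list is pairwise increasing in idxOf
theorem pvPairwise_idxOf (l : List String) (h : l.Nodup) :
    l.Pairwise (fun a b => List.idxOf a l < List.idxOf b l) := by
  rw [List.pairwise_iff_getElem]
  intro i j hi hj hij
  rw [List.Nodup.idxOf_getElem h i hi, List.Nodup.idxOf_getElem h j hj]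
  exact hij

theorem pvSum_ite (l : List Int) (p : Int → Bool) :
    (l.map (fun x => if p x then 1 else 0)).sum = l.countP p := by
  induction l with
  | nil => rfl
  | cons x xs ih => by_cases h : p x <;> simp [h, ih] <;> try omega

-- key in the dict: the item it names
theorem pvKey_item (d : PySem.Dict String (List Int)) (c : String)
    (hnd : d.keys.Nodup) (hc : c ∈ d.keys) : (c, d.getD c []) ∈ d.items := by
  have : c ∈ d.items.map (·.1) := hc
  rcases List.mem_map.mp this with ⟨p, hp, hfst⟩
  have := PySem.Dict.getD_of_mem_items d (k := c) (v := p.2) (by rw [← hfst]; exact hp) hnd []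
  rw [this, ← hfst]
  exact hp

theorem pvMemCourseList (d : PySem.Dict String (List Int)) (c : String) (sid : Int)
    (hnd : d.keys.Nodup) (hc : c ∈ d.keys) :
    (c ∈ (d.items.filter (fun p => p.2.contains sid)).map (·.1))
      ↔ (d.getD c []).contains sid := by
  constructor
  · rintro hmem
    rcases List.mem_map.mp hmem with ⟨p, hp, hfst⟩
    rcases List.mem_filter.mp hp with ⟨hpi, hcon⟩
    have := PySem.Dict.getD_of_mem_items d (k := c) (v := p.2) (by rw [← hfst]; exact hpi) hnd []
    rw [this]
    exact hcon
  · intro hcon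
    have hitem := pvKey_item d c hnd hc
    exact List.mem_map.mpr ⟨(c, d.getD c []), List.mem_filter.mpr ⟨hitem, hcon⟩, rfl⟩

theorem pvFlatPairs_count (input : List (String × List Int)) (c1 c2 : String)
    (h1 : c1 ∈ (PySem.Dict.ofList input).keys) (h2 : c2 ∈ (PySem.Dict.ofList input).keys)
    (hR : List.idxOf c1 (PySem.Dict.ofList input).keys
        < List.idxOf c2 (PySem.Dict.ofList input).keys) :
    (((pvFlat (PySem.Dict.ofList input).items).foldl
        (fun ix q => ix.modify q.1 [] (· ++ [q.2]))
        (PySem.Dict.empty : PySem.Dict Int (List String))).values.flatMap pvPairsList).count (c1, c2)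
    = ((PySem.Set.ofList ((PySem.Dict.ofList input).getD c1 [])).filter
        (fun x => (PySem.Set.ofList ((PySem.Dict.ofList input).getD c2 [])).contains x)).length := by
  set d := PySem.Dict.ofList input with hd
  set names := d.keys with hnames
  set index := (pvFlat d.items).foldl (fun ix q => ix.modify q.1 [] (· ++ [q.2]))
      (PySem.Dict.empty : PySem.Dict Int (List String)) with hindex
  have hndk : names.Nodup := PySem.Dict.nodup_keys_ofList input
  have hpw : names.Pairwise (fun a b => List.idxOf a names < List.idxOf b names) :=
    pvPairwise_idxOf names hndk
  have hasym : ∀ a b : String, List.idxOf a names < List.idxOf b names →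
      ¬ (List.idxOf b names < List.idxOf a names) := by intro a b h; omega
  have hidxnodup := pvIndex_keys_nodup d.items
  rw [PySem.Dict.values_eq_map_keys index (by rw [hindex]; exact hidxnodup) [],
    List.flatMap_map, List.count_flatMap]
  have hstep : ∀ sid ∈ index.keys,
      (List.count (c1, c2) ∘ fun sid => pvPairsList (index.getD sid [])) sid
      = (fun sid => if ((d.getD c1 []).contains sid && (d.getD c2 []).contains sid) = true
          then 1 else 0) sid := by
    intro sid _
    have hgetD : index.getD sid [] = (d.items.filter (fun p => p.2.contains sid)).map (·.1) := by
      rw [hindex]; exact pvIndex_getD d.items sid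
    have hsub : ((d.items.filter (fun p => p.2.contains sid)).map (·.1)).Sublist names :=
      List.filter_sublist.map _
    simp only [Function.comp_apply, hgetD]
    rw [pvPairsList_count _ hasym _ (hndk.sublist hsub) (hpw.sublist hsub) c1 c2 hR]
    rw [if_congr (iff_of_eq (congrArg₂ And
      (propext (pvMemCourseList d c1 sid hndk h1))
      (propext (pvMemCourseList d c2 sid hndk h2)))) rfl rfl]
    simp [Bool.and_eq_true]
  rw [List.map_congr_left hstep, pvSum_ite, List.countP_eq_length_filter]
  -- both sides are lengths of nodup lists with the same members
  have hKnodup : (index.keys.filter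
      (fun sid => (d.getD c1 []).contains sid && (d.getD c2 []).contains sid)).Nodup :=
    hidxnodup.filter _
  have hSnodup : ((PySem.Set.ofList (d.getD c1 [])).filter
      (fun x => (PySem.Set.ofList (d.getD c2 [])).contains x)).Nodup :=
    (PySem.Set.nodup_ofList _).filter _
  have hmemkeys : ∀ x : Int, x ∈ (d.getD c1 []) → x ∈ index.keys := by
    intro x hx
    rw [hindex, pvIndex_keys]
    rw [PySem.Set.mem_ofList, pvMem_flat_fst]
    exact ⟨(c1, d.getD c1 []), pvKey_item d c1 hndk h1, hx⟩
  have hperm : (index.keys.filter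
      (fun sid => (d.getD c1 []).contains sid && (d.getD c2 []).contains sid)).Perm
      ((PySem.Set.ofList (d.getD c1 [])).filter
        (fun x => (PySem.Set.ofList (d.getD c2 [])).contains x)) := by
    rw [List.perm_ext_iff_of_nodup hKnodup hSnodup]
    intro x
    simp only [List.mem_filter, Bool.and_eq_true, List.contains_iff_mem,
      PySem.Set.contains, PySem.Set.mem_ofList]
    constructor
    · rintro ⟨-, hx1, hx2⟩
      exact ⟨hx1, hx2⟩
    · rintro ⟨hx1, hx2⟩
      exact ⟨hmemkeys x hx1, hx1, hx2⟩
  exact hperm.length_eq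


-- the two step functions agree on ordered pairs of distinct keys
theorem pvStepEq (input : List (String × List Int)) (c1 c2 : String)
    (h1 : c1 ∈ (PySem.Dict.ofList input).keys) (h2 : c2 ∈ (PySem.Dict.ofList input).keys)
    (hR : List.idxOf c1 (PySem.Dict.ofList input).keys
        < List.idxOf c2 (PySem.Dict.ofList input).keys)
    (a : List (String × String × Int)) :
    (if ((PySem.Set.ofList ((PySem.Dict.ofList input).getD c1 [])).inter
          (PySem.Set.ofList ((PySem.Dict.ofList input).getD c2 []))).len > 0 then
        a ++ [(c1, c2, ((PySem.Set.ofList ((PySem.Dict.ofList input).getD c1 [])).inter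
          (PySem.Set.ofList ((PySem.Dict.ofList input).getD c2 []))).len)]
      else a)
    = (if (PySem.Dict.counter
          (((pvFlat (PySem.Dict.ofList input).items).foldl
              (fun ix q => ix.modify q.1 [] (· ++ [q.2]))
              (PySem.Dict.empty : PySem.Dict Int (List String))).values.flatMap
            pvPairsList)).contains (c1, c2) then
        a ++ [(c1, c2, (PySem.Dict.counter
          (((pvFlat (PySem.Dict.ofList input).items).foldl
              (fun ix q => ix.modify q.1 [] (· ++ [q.2]))
              (PySem.Dict.empty : PySem.Dict Int (List String))).values.flatMap
            pvPairsList)).getD (c1, c2) 0)]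
      else a) := by
  have hcount := pvFlatPairs_count input c1 c2 h1 h2 hR
  set fp := ((pvFlat (PySem.Dict.ofList input).items).foldl
      (fun ix q => ix.modify q.1 [] (· ++ [q.2]))
      (PySem.Dict.empty : PySem.Dict Int (List String))).values.flatMap pvPairsList with hfp
  set N := ((PySem.Set.ofList ((PySem.Dict.ofList input).getD c1 [])).filter
      (fun x => (PySem.Set.ofList ((PySem.Dict.ofList input).getD c2 [])).contains x)).length
    with hN
  have hlen : ((PySem.Set.ofList ((PySem.Dict.ofList input).getD c1 [])).inter
      (PySem.Set.ofList ((PySem.Dict.ofList input).getD c2 []))).len = (N : Int) := rfl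
  have hgetD : (PySem.Dict.counter fp).getD (c1, c2) 0 = (N : Int) := by
    rw [PySem.Dict.getD_counter, hcount]
  have hcontains : (PySem.Dict.counter fp).contains (c1, c2) = fp.contains (c1, c2) :=
    PySem.Dict.contains_counter fp (c1, c2)
  by_cases hpos : 0 < N
  · have hmem : (c1, c2) ∈ fp := List.count_pos_iff.mp (by omega)
    have : (PySem.Dict.counter fp).contains (c1, c2) = true := by
      rw [hcontains]; exact List.contains_iff_mem.mpr hmem
    rw [hlen, hgetD, if_pos (by exact_mod_cast hpos), if_pos this]
  · have hz : N = 0 := by omega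
    have hnmem : (c1, c2) ∉ fp := by
      intro hmem
      have := List.count_pos_iff.mpr hmem
      omega
    have : (PySem.Dict.counter fp).contains (c1, c2) = false := by
      rw [hcontains]
      simpa using hnmem
    rw [hlen, if_neg (by exact_mod_cast hpos), if_neg (by simp [this])]

theorem pvMain (input : List (String × List Int)) :
    compute_all_overlaps input = compute_all_overlaps_alt input := by
  unfold compute_all_overlaps compute_all_overlaps_alt
  dsimp only
  rw [pvIndex_eq_flat_foldl]
  have hcounter :
      (((pvFlat (PySem.Dict.ofList input).items).foldl
          (fun ix q => ix.modify q.1 [] (· ++ [q.2]))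
          (PySem.Dict.empty : PySem.Dict Int (List String))).values).foldl
        (fun ct cl => pvPairCount ct cl) PySem.Dict.empty
      = PySem.Dict.counter
          ((((pvFlat (PySem.Dict.ofList input).items).foldl
              (fun ix q => ix.modify q.1 [] (· ++ [q.2]))
              (PySem.Dict.empty : PySem.Dict Int (List String))).values).flatMap pvPairsList) := by
    rw [PySem.List.foldl_congr_mem _ _
        (fun ct cl => (pvPairsList cl).foldl (fun d x => d.insert x (d.getD x 0 + 1)) ct) _
        (fun ct cl _ => pvPairCount_eq_foldl ct cl),
      ← List.foldl_flatMap, PySem.Dict.foldl_insert_getD_add_one_eq_counter]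
  rw [hcounter, pvEmit_eq_pairsFold]
  refine congrArg (fun l => PySem.List.sorted l (fun x : String × String × Int => x.2.2) true) ?_
  refine Eq.trans (pvDoubleLoop_eq_pairsFold (fun a x y =>
      if ((PySem.Set.ofList ((PySem.Dict.ofList input).getD x [])).inter
          (PySem.Set.ofList ((PySem.Dict.ofList input).getD y []))).len > 0 then
        a ++ [(x, y, ((PySem.Set.ofList ((PySem.Dict.ofList input).getD x [])).inter
          (PySem.Set.ofList ((PySem.Dict.ofList input).getD y []))).len)]
      else a) (PySem.Dict.ofList input).keys []) ?_
  exact pvPairsFold_congr _ _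
    (fun a b => List.idxOf a (PySem.Dict.ofList input).keys
      < List.idxOf b (PySem.Dict.ofList input).keys)
    (PySem.Dict.ofList input).keys
    (pvPairwise_idxOf _ (PySem.Dict.nodup_keys_ofList input))
    (fun a c1 c2 hm1 hm2 hRc => pvStepEq input c1 c2 hm1 hm2 hRc a) []

-- ===== VERDICT (by name: the statement is the Claim_ definition above) =====
theorem compute_all_overlaps_spec : Claim_equal_compute_all_overlaps := by
  intro input _
  exact pvMain input
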